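-- pv_equiv track=rewrite | github.com/subhash686/aoc-23 | day7.py | get_hand
-- ===== SOURCE A (Python) =====
-- CARDS = {"T": 10, "J": 11, "Q": 12, "K": 13, "A": 14}
--
-- def get_hand(hand):
--     caount_map = {}
--
--     for h in range(0, 5):
--         card = CARDS.get(hand[h], hand[h])
--         caount_map[card] = caount_map.get(card, 0) + 1
--
--     strg=""
--     for value in caount_map.values():
--         strg += str(value) if value != 0 else ""
--
--     strg = "".join(sorted(strg, reverse=True))
--     return strg
-- ===== SOURCE B (Python) =====
-- def _runs(cards):
--     # run lengths of consecutive equal cards in a sorted list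
--     if not cards:
--         return []
--     n = 1
--     while n < len(cards) and cards[n] == cards[0]:
--         n += 1
--     return [n] + _runs(cards[n:])
--
--
-- def get_hand(hand):
--     cards = sorted([hand[h] for h in range(5)])
--     runs = sorted(_runs(cards), reverse=True)
--     return "".join(str(r) for r in runs)
-- ===== Notes on version B (the rewrite author's own statement) =====
-- stated objective: alternative
-- what changed: Replaced the hash-map frequency count over card aliases by sort-then-group: B sorts the 5 cards, computes consecutive run lengths recursively, sorts those descending and joins them, instead of A's dict of counts whose digit string is sorted afterwards.
import Mathlib
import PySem

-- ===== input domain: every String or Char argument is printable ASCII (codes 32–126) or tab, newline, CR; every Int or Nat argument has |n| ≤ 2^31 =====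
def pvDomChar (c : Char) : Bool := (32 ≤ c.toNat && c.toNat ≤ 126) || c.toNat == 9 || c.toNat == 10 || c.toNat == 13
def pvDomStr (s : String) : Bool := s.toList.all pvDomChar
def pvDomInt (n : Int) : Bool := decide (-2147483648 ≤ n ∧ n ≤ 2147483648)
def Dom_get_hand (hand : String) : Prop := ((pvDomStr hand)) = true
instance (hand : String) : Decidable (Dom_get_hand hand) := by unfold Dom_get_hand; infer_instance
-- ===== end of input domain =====

-- B replaces A's hash-map frequency count by sort-then-group run lengths; alternative algorithm, same result.

-- ===== PORT A =====
-- CARDS = {"T": 10, "J": 11, "Q": 12, "K": 13, "A": 14}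
def pvCARDS : PySem.Dict Char Int :=
  PySem.Dict.mk [('T', 10), ('J', 11), ('Q', 12), ('K', 13), ('A', 14)]

-- a Python dict key that is either an int (for T/J/Q/K/A) or a str (the character itself)
inductive PyKey : Type
  | int : Int → PyKey
  | str : Char → PyKey
deriving DecidableEq, Repr

-- card = CARDS.get(hand[h], hand[h])
def pvCard (c : Char) : PyKey :=
  match pvCARDS.get? c with
  | some v => PyKey.int v
  | none => PyKey.str c

def get_hand (hand : String) : String :=
  -- for h in range(0, 5): caount_map[card] = caount_map.get(card, 0) + 1
  let cm : Option (PySem.Dict PyKey Int) :=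
    (PySem.List.pyRange 0 5).foldl
      (fun acc h =>
        acc.bind fun m => (PySem.Str.pyGet? hand h).map fun ch =>
          m.insert (pvCard ch) (m.getD (pvCard ch) 0 + 1))
      (some PySem.Dict.empty)
  match cm with
  | none => ""   -- hand[h] raised IndexError (hand shorter than 5); excluded by Pre_
  | some m =>
    -- strg += str(value) if value != 0 else ""
    let strg := m.values.foldl (fun s v => s ++ (if v ≠ 0 then PySem.Int.toStr v else "")) ""
    -- "".join(sorted(strg, reverse=True))
    PySem.Str.join "" ((PySem.List.sorted strg.toList (fun c => c) true).map fun c => String.ofList [c])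

-- ===== PORT B =====
-- _runs(cards): the inner while loop counts the prefix of cards[1:] equal to cards[0]
-- (exactly List.takeWhile), so n = 1 + t and cards[n:] = rest.drop t.
def pvRuns : List Char → List Int
  | [] => []
  | c :: rest =>
    let t := (rest.takeWhile (fun x => x == c)).length
    ((1 + t : Nat) : Int) :: pvRuns (rest.drop t)
termination_by l => l.length
decreasing_by simp [List.length_drop]

def get_hand_alt (hand : String) : String :=
  -- [hand[h] for h in range(5)]
  let cards? : Option (List Char) :=
    (PySem.List.pyRange 0 5).foldl
      (fun acc h => acc.bind fun l => (PySem.Str.pyGet? hand h).map fun ch => l ++ [ch])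
      (some [])
  match cards? with
  | none => ""   -- hand[h] raised IndexError (hand shorter than 5); excluded by Pre_
  | some l =>
    let cards := PySem.List.sorted l (fun x => x)
    let runs := PySem.List.sorted (pvRuns cards) (fun x => x) true
    PySem.Str.join "" (runs.map PySem.Int.toStr)

-- ===== PRECONDITION & SPEC =====
-- Pre_ excludes only hands shorter than 5 characters, on which A (hand[h]) raises IndexError.
def Pre_get_hand (hand : String) : Prop := 5 ≤ hand.toList.length
instance (hand : String) : Decidable (Pre_get_hand hand) := by unfold Pre_get_hand; infer_instance
def pvWitness_get_hand : String := "AAT23"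

def Spec_get_hand (hand : String) (out : String) : Prop := out = get_hand_alt hand
instance (hand : String) (out : String) : Decidable (Spec_get_hand hand out) := by unfold Spec_get_hand; infer_instance

-- ===== CLAIM (what is proved, stated in full; the proofs are below) =====
def Claim_equal_get_hand : Prop := ∀ (hand : String), Dom_get_hand hand → Pre_get_hand hand → Spec_get_hand hand (get_hand hand)

-- ===== LEMMAS AND PROOFS =====

-- digit character of a count (proof-side abbreviation only)
def pvDigit (v : Int) : Char := Char.ofNat (48 + v.toNat)

theorem pvDigit_toChars (v : Int) (h1 : 1 ≤ v) (h5 : v ≤ 5) :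
    PySem.Int.toChars v = [pvDigit v] := by
  interval_cases v <;> rfl

theorem pvDigit_mono (m n : Int) (hm1 : 1 ≤ m) (hm5 : m ≤ 5) (hn1 : 1 ≤ n) (hn5 : n ≤ 5)
    (h : n ≤ m) : pvDigit n ≤ pvDigit m := by
  interval_cases m <;> interval_cases n <;> first | rfl | (exact le_of_lt (by decide))

theorem pvCard_left_inv (c : Char) :
    (match pvCard c with
     | PyKey.int 10 => 'T' | PyKey.int 11 => 'J' | PyKey.int 12 => 'Q'
     | PyKey.int 13 => 'K' | PyKey.int 14 => 'A' | PyKey.int _ => ' '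
     | PyKey.str c => c) = c := by
  by_cases h1 : c = 'T'; · subst h1; rfl
  by_cases h2 : c = 'J'; · subst h2; rfl
  by_cases h3 : c = 'Q'; · subst h3; rfl
  by_cases h4 : c = 'K'; · subst h4; rfl
  by_cases h5 : c = 'A'; · subst h5; rfl
  have e1 : ('T' == c) = false := beq_eq_false_iff_ne.mpr (Ne.symm h1)
  have e2 : ('J' == c) = false := beq_eq_false_iff_ne.mpr (Ne.symm h2)
  have e3 : ('Q' == c) = false := beq_eq_false_iff_ne.mpr (Ne.symm h3)
  have e4 : ('K' == c) = false := beq_eq_false_iff_ne.mpr (Ne.symm h4)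
  have e5 : ('A' == c) = false := beq_eq_false_iff_ne.mpr (Ne.symm h5)
  have : pvCard c = PyKey.str c := by
    unfold pvCard pvCARDS
    simp [PySem.Dict.get?, List.find?, e1, e2, e3, e4, e5]
  rw [this]

theorem pvCard_inj : Function.Injective pvCard := by
  intro a b h
  have ha := pvCard_left_inv a
  rw [h, pvCard_left_inv b] at ha
  exact ha.symm

theorem pvOfList_map (f : Char → PyKey) (hf : Function.Injective f) (l : List Char) :
    PySem.Set.ofList (l.map f) = (PySem.Set.ofList l).map f := by
  induction l with
  | nil => rfl
  | cons x xs ih =>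
    rw [List.map_cons, PySem.Set.ofList_cons, PySem.Set.ofList_cons, ih]
    simp only [PySem.Set.discard, List.map_cons, List.filter_map]
    have hp : ((fun y => !y == f x) ∘ f) = (fun y => !y == x) := by
      funext y
      by_cases hyx : y = x
      · subst hyx; simp
      · have hno : f y ≠ f x := fun hc => hyx (hf hc)
        simp [hyx, hno]
    rw [hp]

theorem pvCounter_values {κ : Type} [BEq κ] [LawfulBEq κ] (xs : List κ) :
    (PySem.Dict.counter xs).values
      = (PySem.Set.ofList xs).map (fun k => (List.count k xs : Int)) := by
  simp [PySem.Dict.values, PySem.Dict.items_counter, List.map_map, Function.comp]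

theorem pvFoldl_strg (vals : List Int) (s : String) :
    (vals.foldl (fun s v => s ++ (if v ≠ 0 then PySem.Int.toStr v else "")) s).toList
      = s.toList ++ (vals.map fun v => if v ≠ 0 then PySem.Int.toChars v else []).flatten := by
  induction vals generalizing s with
  | nil => simp
  | cons v vs ih =>
    simp only [List.foldl_cons, List.map_cons, List.flatten_cons, ih]
    split_ifs <;> simp [PySem.Int.toList_toStr]

theorem pvFlatten_singletons {α β : Type} (f : α → β) (l : List α) :
    (l.map fun x => [f x]).flatten = l.map f := by
  induction l with
  | nil => rfl
  | cons x xs ih => simp [ih]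

-- run lengths of a sorted list are the multiplicities of its distinct elements in first-occurrence order
theorem pvRuns_sorted_fuel : ∀ (n : Nat) (l : List Char), l.length ≤ n → l.Pairwise (· ≤ ·) →
    pvRuns l = (PySem.Set.ofList l).map (fun k => (List.count k l : Int)) := by
  intro n
  induction n with
  | zero =>
    intro l hl _
    have hnil : l = [] := List.eq_nil_of_length_eq_zero (by omega)
    subst hnil; rw [pvRuns]; rfl
  | succ n ih =>
    intro l hl h
    cases l with
    | nil => rw [pvRuns]; rfl
    | cons c rest =>
      rw [pvRuns]
      set t := (rest.takeWhile (fun x => x == c)).length with ht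
      have hrest : rest.Pairwise (· ≤ ·) := (List.pairwise_cons.mp h).2
      have hcrest : ∀ y ∈ rest, c ≤ y := (List.pairwise_cons.mp h).1
      set r := rest.dropWhile (fun x => x == c) with hr
      have hdrop : rest.drop t = r := by
        have hsplit := List.takeWhile_append_dropWhile (p := fun x => x == c) (l := rest)
        calc rest.drop t = ((rest.takeWhile (fun x => x == c)) ++ r).drop t := by rw [hsplit]
          _ = r := List.drop_left
      have htmem : ∀ x ∈ rest.takeWhile (fun x => x == c), x = c := by
        intro x hx
        simpa using List.mem_takeWhile_imp hx
      have hrsub : r.Sublist rest := List.dropWhile_sublist _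
      have hrpair : r.Pairwise (· ≤ ·) := hrest.sublist hrsub
      have hcnr : c ∉ r := by
        cases hR : r with
        | nil => simp
        | cons x r' =>
          have hx : (x == c) = false := by
            have hh := List.head?_dropWhile_not (p := fun x => x == c) (l := rest)
            rw [← hr, hR] at hh
            simpa using hh
          have hxc : x ≠ c := by simpa using hx
          have hcx : c < x := lt_of_le_of_ne (hcrest x (hrsub.mem (by rw [hR]; simp))) (Ne.symm hxc)
          intro hmem
          rcases List.mem_cons.mp hmem with h1 | h1
          · exact hxc h1.symm
          · have hxy : x ≤ c := by
              have hp := (List.pairwise_cons.mp (by rwa [hR] at hrpair)).1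
              exact hp c h1
            exact absurd hxy (not_le.mpr hcx)
      have hcount : List.count c (c :: rest) = 1 + t := by
        have hcr : List.count c rest = t := by
          conv_lhs => rw [← List.takeWhile_append_dropWhile (p := fun x => x == c) (l := rest), ← hr]
          rw [List.count_append]
          have htl : List.count c (rest.takeWhile (fun x => x == c)) = t :=
            List.count_eq_length.mpr (fun b hb => (htmem b hb).symm)
          have hz : List.count c r = 0 := List.count_eq_zero.mpr hcnr
          omega
        rw [List.count_cons_self, hcr]; omega
      have hset : ∀ tl, (∀ x ∈ tl, x = c) →
          (PySem.Set.ofList (tl ++ r)).discard c = PySem.Set.ofList r := by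
        intro tl
        induction tl with
        | nil =>
          intro _
          simp only [List.nil_append, PySem.Set.discard]
          apply List.filter_eq_self.mpr
          intro y hy
          have hyr : y ∈ r := (PySem.Set.mem_ofList r y).mp hy
          simp only [Bool.not_eq_eq_eq_not, Bool.not_true, beq_eq_false_iff_ne]
          intro hyc; exact hcnr (hyc ▸ hyr)
        | cons x tl' ihtl =>
          intro hall
          have hx : x = c := hall x (by simp)
          subst hx
          rw [List.cons_append, PySem.Set.ofList_cons]
          simp only [PySem.Set.discard, List.filter_cons]
          rw [if_neg (by simp)]
          rw [List.filter_filter]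
          have hpp : (fun y => !y == x && !y == x) = (fun y => !y == x) := by
            funext y; rw [Bool.and_self]
          rw [hpp]
          exact ihtl (fun y hy => hall y (List.mem_cons_of_mem _ hy))
      have hlen : r.length ≤ n := by
        have hle := hrsub.length_le
        simp only [List.length_cons] at hl
        omega
      rw [hdrop, ih r hlen hrpair, PySem.Set.ofList_cons]
      have hsetr : (PySem.Set.ofList rest).discard c = PySem.Set.ofList r := by
        conv_lhs => rw [← List.takeWhile_append_dropWhile (p := fun x => x == c) (l := rest), ← hr]
        exact hset _ htmem
      rw [List.map_cons, hsetr, hcount]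
      congr 1
      apply List.map_congr_left
      intro k hk
      have hkr : k ∈ r := (PySem.Set.mem_ofList r k).mp hk
      have hkc : k ≠ c := fun hkc => hcnr (hkc ▸ hkr)
      congr 1
      have hsplit : List.count k rest
          = List.count k (rest.takeWhile (fun x => x == c)) + List.count k r := by
        conv_lhs => rw [← List.takeWhile_append_dropWhile (p := fun x => x == c) (l := rest), ← hr]
        rw [List.count_append]
      have hzz : List.count k (rest.takeWhile (fun x => x == c)) = 0 :=
        List.count_eq_zero.mpr (fun hm => hkc (htmem k hm))
      have hc2 : List.count k (c :: rest) = List.count k rest := by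
        simp [Ne.symm hkc]
      omega

theorem pvRuns_sorted (l : List Char) (h : l.Pairwise (· ≤ ·)) :
    pvRuns l = (PySem.Set.ofList l).map (fun k => (List.count k l : Int)) :=
  pvRuns_sorted_fuel l.length l (le_refl _) h

-- descending sort commutes with mapping counts (all in 1..5) to their digit characters
theorem pvSorted_map_digit (v w : List Int) (hperm : w.Perm v)
    (hb : ∀ x ∈ v, 1 ≤ x ∧ x ≤ 5) :
    PySem.List.sorted (v.map pvDigit) (fun c => c) true
      = (PySem.List.sorted w (fun x => x) true).map pvDigit := by
  have hbw : ∀ x ∈ PySem.List.sorted w (fun x => x) true, 1 ≤ x ∧ x ≤ 5 := by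
    intro x hx
    exact hb x (hperm.mem_iff.mp (((PySem.List.sorted_perm w (fun x => x) true)).mem_iff.mp hx))
  apply List.Perm.eq_of_pairwise
      (le := fun (a b : Char) => b ≤ a)
  · intro a b _ _ h1 h2; exact le_antisymm h2 h1
  · exact PySem.List.sorted_pairwise_rev (v.map pvDigit) (fun c => c)
  · rw [List.pairwise_map]
    have hp := PySem.List.sorted_pairwise_rev w (fun x => x)
    refine List.Pairwise.imp_of_mem ?_ hp
    intro a b ha hb' hle
    obtain ⟨ha1, ha5⟩ := hbw a ha
    obtain ⟨hb1, hb5⟩ := hbw b hb'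
    exact pvDigit_mono a b ha1 ha5 hb1 hb5 hle
  · exact ((PySem.List.sorted_perm (v.map pvDigit) (fun c => c) true).trans
        ((hperm.map pvDigit).symm)).trans
        ((PySem.List.sorted_perm w (fun x => x) true).map pvDigit).symm

theorem pvGet5 (hand : String) (a b c d e : Char) (rest : List Char)
    (hl : hand.toList = a :: b :: c :: d :: e :: rest) :
    PySem.Str.pyGet? hand 0 = some a ∧ PySem.Str.pyGet? hand 1 = some b ∧
    PySem.Str.pyGet? hand 2 = some c ∧ PySem.Str.pyGet? hand 3 = some d ∧
    PySem.Str.pyGet? hand 4 = some e := by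
  refine ⟨?_, ?_, ?_, ?_, ?_⟩ <;>
  · simp only [PySem.Str.pyGet?_eq, PySem.Chars.pyGet?_eq_listPyGet?, hl]
    rw [PySem.List.pyGet?, PySem.List.pyIdx?, if_pos (by omega), if_pos (by simp; omega)]
    rfl

-- ===== VERDICT (by name: the statement is the Claim_ definition above) =====
theorem get_hand_spec : Claim_equal_get_hand := by
  intro hand _ hpre
  unfold Spec_get_hand
  obtain ⟨a, b, c, d, e, rest, hl⟩ :
      ∃ a b c d e rest, hand.toList = a :: b :: c :: d :: e :: rest := by
    have := hpre
    unfold Pre_get_hand at this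
    match hL : hand.toList with
    | [] | [_] | [_,_] | [_,_,_] | [_,_,_,_] => rw [hL] at this; simp at this
    | a :: b :: c :: d :: e :: rest => exact ⟨a, b, c, d, e, rest, rfl⟩
  obtain ⟨h0, h1, h2, h3, h4⟩ := pvGet5 hand a b c d e rest hl
  have hrange : PySem.List.pyRange 0 5 = [0, 1, 2, 3, 4] := by decide
  -- the five cards
  set cs : List Char := [a, b, c, d, e] with hcs
  -- A's dict loop builds Counter(map pvCard cs)
  have hdict : (PySem.List.pyRange 0 5).foldl
      (fun (acc : Option (PySem.Dict PyKey Int)) h =>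
        acc.bind fun m => (PySem.Str.pyGet? hand h).map fun ch =>
          m.insert (pvCard ch) (m.getD (pvCard ch) 0 + 1))
      (some PySem.Dict.empty)
      = some (PySem.Dict.counter (cs.map pvCard)) := by
    rw [hrange]
    simp only [List.foldl_cons, List.foldl_nil, h0, h1, h2, h3, h4,
      Option.bind_some, Option.map_some]
    rw [← PySem.Dict.foldl_insert_getD_add_one_eq_counter]
    rfl
  -- B's comprehension builds cs
  have hcards : (PySem.List.pyRange 0 5).foldl
      (fun (acc : Option (List Char)) h =>
        acc.bind fun l => (PySem.Str.pyGet? hand h).map fun ch => l ++ [ch])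
      (some [])
      = some cs := by
    rw [hrange]
    simp only [List.foldl_cons, List.foldl_nil, h0, h1, h2, h3, h4,
      Option.bind_some, Option.map_some]
    rfl
  rw [get_hand, get_hand_alt]
  simp only [hdict, hcards]
  -- the element counts of the five cards, in first-occurrence order
  set counts : List Int := (PySem.Set.ofList cs).map (fun k => (List.count k cs : Int)) with hcounts
  have hvals : (PySem.Dict.counter (cs.map pvCard)).values = counts := by
    rw [pvCounter_values, pvOfList_map pvCard pvCard_inj, List.map_map, hcounts]
    apply List.map_congr_left
    intro k _
    simp only [Function.comp]
    exact congrArg Int.ofNat (List.count_map_of_injective cs pvCard pvCard_inj k)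
  have hbc : ∀ x ∈ counts, 1 ≤ x ∧ x ≤ 5 := by
    intro x hx
    rw [hcounts] at hx
    obtain ⟨k, hk, rfl⟩ := List.mem_map.mp hx
    have hkcs : k ∈ cs := (PySem.Set.mem_ofList cs k).mp hk
    have hpos : 0 < List.count k cs := List.count_pos_iff.mpr hkcs
    have hle : List.count k cs ≤ cs.length := List.count_le_length
    have hlen5 : cs.length = 5 := by simp [hcs]
    omega
  set cards : List Char := PySem.List.sorted cs (fun x => x) with hcards2
  have hcperm : cards.Perm cs := PySem.List.sorted_perm cs (fun x => x) false
  have hrun_eq : pvRuns cards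
      = (PySem.Set.ofList cards).map (fun k => (List.count k cards : Int)) :=
    pvRuns_sorted cards (PySem.List.sorted_pairwise cs (fun x => x))
  have hperm : (pvRuns cards).Perm counts := by
    rw [hrun_eq, hcounts]
    have hstep : (PySem.Set.ofList cards).map (fun k => (List.count k cards : Int))
        = (PySem.Set.ofList cards).map (fun k => (List.count k cs : Int)) := by
      apply List.map_congr_left
      intro k _
      exact congrArg Int.ofNat (hcperm.count_eq k)
    rw [hstep]
    refine List.Perm.map _ ?_
    refine (List.perm_ext_iff_of_nodup (PySem.Set.nodup_ofList _) (PySem.Set.nodup_ofList _)).mpr ?_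
    intro x
    rw [PySem.Set.mem_ofList, PySem.Set.mem_ofList]
    exact hcperm.mem_iff
  have hbr : ∀ x ∈ PySem.List.sorted (pvRuns cards) (fun x => x) true, 1 ≤ x ∧ x ≤ 5 := by
    intro x hx
    exact hbc x (hperm.mem_iff.mp
      ((PySem.List.sorted_perm (pvRuns cards) (fun x => x) true).mem_iff.mp hx))
  -- compare the two result strings character by character
  apply String.toList_inj.mp
  rw [PySem.Str.toList_join, PySem.Str.toList_join]
  have hsep : ("" : String).toList = [] := rfl
  rw [hsep]
  -- A's character list
  have hstrg : ((PySem.Dict.counter (cs.map pvCard)).values.foldl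
      (fun s v => s ++ (if v ≠ 0 then PySem.Int.toStr v else "")) "").toList
      = counts.map pvDigit := by
    rw [hvals, pvFoldl_strg]
    rw [hsep, List.nil_append]
    have hmap : counts.map (fun v => if v ≠ 0 then PySem.Int.toChars v else [])
        = counts.map (fun v => [pvDigit v]) := by
      apply List.map_congr_left
      intro v hv
      obtain ⟨hv1, hv5⟩ := hbc v hv
      rw [if_pos (by omega), pvDigit_toChars v hv1 hv5]
    rw [hmap, pvFlatten_singletons]
  rw [List.map_map]
  have hone : (String.toList ∘ fun c => String.ofList [c]) = fun c => [c] := by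
    funext ch; simp
  rw [hone, PySem.Chars.join_nil_singletons, hstrg]
  have hthree : List.map String.toList
        ((PySem.List.sorted (pvRuns cards) (fun x => x) true).map PySem.Int.toStr)
      = ((PySem.List.sorted (pvRuns cards) (fun x => x) true).map pvDigit).map (fun ch => [ch]) := by
    rw [List.map_map, List.map_map]
    apply List.map_congr_left
    intro v hv
    obtain ⟨hv1, hv5⟩ := hbr v hv
    simp only [Function.comp, PySem.Int.toList_toStr]
    rw [pvDigit_toChars v hv1 hv5]
  rw [hthree, PySem.Chars.join_nil_singletons]
  exact pvSorted_map_digit counts (pvRuns cards) hperm hbc
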